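-- pv_equiv track=rewrite | github.com/cottayson/pawn-duel-solution | pawnDuel.py | step
-- ===== SOURCE A (Python) =====
-- def step(bunch):
-- 	arr = []
-- 	for i in range(len(bunch)):
-- 		for amount in range(1, 4): # максимум 3 монеты
-- 			if amount > bunch[i]:
-- 				break
-- 			b = bunch.copy()
-- 			if amount == b[i]:
-- 				del b[i]
-- 			else:
-- 				# amount < b[i]
-- 				b[i] -= amount
-- 			b.sort()
-- 			if b not in arr:
-- 				arr.append(b)
-- 	arr.sort()
-- 	return arr
-- ===== SOURCE B (Python) =====
-- def _insort(xs, x):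
--     # xs is sorted ascending; return a new sorted list with x inserted
--     i = 0
--     while i < len(xs) and xs[i] < x:
--         i += 1
--     return xs[:i] + [x] + xs[i:]
--
-- def step(bunch):
--     # Successors are in bijection with pairs (v, amount): distinct pairs give
--     # distinct multisets (full removals shorten the list, partial removals with
--     # different (v, amount) differ in their counts), so no dedup test is needed.
--     base = sorted(bunch)
--     out = []
--     for v in sorted(set(bunch)):
--         if v <= 0:
--             continue
--         rest = base.copy()
--         rest.remove(v)
--         for amount in range(1, min(3, v) + 1):
--             out.append(rest.copy() if amount == v else _insort(rest, v - amount))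
--     return sorted(out)
-- ===== Notes on version B (the rewrite author's own statement) =====
-- stated objective: faster
-- what changed: B enumerates (distinct value, amount) pairs and emits each successor exactly once with no membership/dedup test (distinct pairs provably give distinct multisets), building each successor in sorted order by a single insertion into the pre-sorted base instead of sorting every candidate and scanning the accumulator.
import Mathlib
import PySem

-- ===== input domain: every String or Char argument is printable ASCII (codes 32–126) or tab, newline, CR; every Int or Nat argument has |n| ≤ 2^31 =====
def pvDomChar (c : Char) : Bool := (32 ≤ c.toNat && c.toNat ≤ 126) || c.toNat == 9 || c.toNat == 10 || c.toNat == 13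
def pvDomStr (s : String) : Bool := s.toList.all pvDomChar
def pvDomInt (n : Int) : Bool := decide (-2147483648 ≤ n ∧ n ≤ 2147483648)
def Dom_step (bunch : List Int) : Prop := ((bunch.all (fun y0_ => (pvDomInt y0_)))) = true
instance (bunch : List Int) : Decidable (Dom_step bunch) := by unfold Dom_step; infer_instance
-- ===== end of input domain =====

-- B emits each successor exactly once (distinct (value,amount) pairs give distinct multisets, proved below), building it sorted by one insertion into the pre-sorted base; objective: faster (no per-candidate sort, no accumulator dedup scan).


-- ===== PORT A =====
-- inner 'for amount in range(1, 4)' loop with its break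
def stepInner (bunch : List Int) (i : Nat) (amounts : List Int) (arr : List (List Int)) : List (List Int) :=
  match amounts with
  | [] => arr
  | amount :: rest =>
    if amount > bunch.getD i 0 then arr   -- break
    else
      let b := bunch
      let b := if amount = b.getD i 0 then b.eraseIdx i else b.set i (b.getD i 0 - amount)
      let b := PySem.List.sorted b (fun x => x)
      let arr := if b ∈ arr then arr else arr ++ [b]
      stepInner bunch i rest arr

def step (bunch : List Int) : List (List Int) :=
  let arr := (List.range bunch.length).foldl (fun arr i => stepInner bunch i [1, 2, 3] arr) []
  PySem.List.sorted arr (fun x => x)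

-- ===== PORT B =====
-- _insort: the while loop counts the leading elements < x, then slices around position i
def insort (xs : List Int) (x : Int) : List Int :=
  let i := (xs.takeWhile (fun y => decide (y < x))).length
  xs.take i ++ [x] ++ xs.drop i

def step_alt (bunch : List Int) : List (List Int) :=
  let base := PySem.List.sorted bunch (fun x => x)
  let out := (PySem.List.sorted (PySem.Set.ofList bunch) (fun x => x)).foldl (fun out v =>
    if v ≤ 0 then out
    else
      let rest := (PySem.List.remove? base v).getD []
      (PySem.List.pyRange 1 (min 3 v + 1)).foldl (fun out amount =>
        out ++ [if amount = v then rest else insort rest (v - amount)]) out) []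
  PySem.List.sorted out (fun x => x)

-- ===== PRECONDITION & SPEC =====
def Spec_step (bunch : List Int) (out : List (List Int)) : Prop := out = step_alt bunch
instance (bunch : List Int) (out : List (List Int)) : Decidable (Spec_step bunch out) := by unfold Spec_step; infer_instance

-- ===== CLAIM (what is proved, stated in full; the proofs are below) =====
def Claim_equal_step : Prop := ∀ (bunch : List Int), Dom_step bunch → Spec_step bunch (step bunch)

-- ===== LEMMAS AND PROOFS =====

-- the canonical successor: remove one occurrence of v and give back v - amount coins (if any), sorted
def canon (bunch : List Int) (v amount : Int) : List Int :=
  PySem.List.sorted (if amount = v then bunch.erase v else bunch.erase v ++ [v - amount]) (fun x => x)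

-- the common membership predicate both accumulators end with
def SuccMem (bunch : List Int) (x : List Int) : Prop :=
  ∃ v, v ∈ bunch ∧ ∃ a : Int, 1 ≤ a ∧ a ≤ 3 ∧ a ≤ v ∧ x = canon bunch v a

theorem perm_eraseIdx_erase (l : List Int) (i : Nat) (h : i < l.length) :
    (l.eraseIdx i).Perm (l.erase l[i]) := by
  induction l generalizing i with
  | nil => simp at h
  | cons x t ih =>
    cases i with
    | zero => simp
    | succ j =>
      have hj : j < t.length := by simpa using h
      simp only [List.eraseIdx_cons_succ, List.getElem_cons_succ]
      by_cases hx : x = t[j]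
      · subst hx
        rw [List.erase_cons_head]
        exact ((ih j hj).cons _).trans ((List.perm_cons_erase (List.getElem_mem hj)).symm)
      · rw [List.erase_cons_tail (by simpa using hx)]
        exact (ih j hj).cons x

theorem perm_set_erase (l : List Int) (i : Nat) (w : Int) (h : i < l.length) :
    (l.set i w).Perm (l.erase l[i] ++ [w]) := by
  have h1 : (l.set i w).Perm (l.eraseIdx i ++ [w]) := by
    induction l generalizing i with
    | nil => simp at h
    | cons x t ih =>
      cases i with
      | zero => simpa using (List.perm_append_singleton w t).symm
      | succ j =>
        simp only [List.set_cons_succ, List.eraseIdx_cons_succ, List.cons_append]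
        exact List.Perm.cons _ (ih j (by simpa using h))
  exact h1.trans ((perm_eraseIdx_erase l i h).append_right [w])

-- the value A adds for index i and amount a equals the canonical successor
theorem bval_eq_canon (bunch : List Int) (i : Nat) (a : Int) (hi : i < bunch.length) :
    PySem.List.sorted (if a = bunch.getD i 0 then bunch.eraseIdx i
      else bunch.set i (bunch.getD i 0 - a)) (fun x => x) = canon bunch (bunch.getD i 0) a := by
  rw [List.getD_eq_getElem bunch 0 hi]
  unfold canon
  by_cases ha : a = bunch[i]
  · rw [if_pos ha, if_pos ha]
    exact PySem.List.sorted_eq_sorted_of_perm _ _ _ (fun _ _ h => h) (perm_eraseIdx_erase bunch i hi)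
  · rw [if_neg ha, if_neg ha]
    exact PySem.List.sorted_eq_sorted_of_perm _ _ _ (fun _ _ h => h) (perm_set_erase bunch i _ hi)

theorem nodup_stepInner (bunch : List Int) (i : Nat) (amounts : List Int) (arr : List (List Int))
    (h : arr.Nodup) : (stepInner bunch i amounts arr).Nodup := by
  induction amounts generalizing arr with
  | nil => simpa [stepInner] using h
  | cons a rest ih =>
    simp only [stepInner]
    split_ifs with h1 h2 h3 h4
    · exact h
    · exact ih _ h
    · exact ih _ (by simp only [List.nodup_append]; exact ⟨h, List.nodup_singleton _, fun y hy z hz => by simp only [List.mem_singleton] at hz; subst hz; exact fun he => h3 (he ▸ hy)⟩)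
    · exact ih _ h
    · exact ih _ (by simp only [List.nodup_append]; exact ⟨h, List.nodup_singleton _, fun y hy z hz => by simp only [List.mem_singleton] at hz; subst hz; exact fun he => h4 (he ▸ hy)⟩)

-- break-loop shape: the processed amounts are exactly the takeWhile prefix
theorem mem_stepInner_gen (bunch : List Int) (i : Nat) (amounts : List Int)
    (arr : List (List Int)) (x : List Int) :
    x ∈ stepInner bunch i amounts arr ↔
      x ∈ arr ∨ ∃ a ∈ amounts.takeWhile (fun a => decide (a ≤ bunch.getD i 0)),
        x = PySem.List.sorted (if a = bunch.getD i 0 then bunch.eraseIdx i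
              else bunch.set i (bunch.getD i 0 - a)) (fun x => x) := by
  induction amounts generalizing arr with
  | nil => simp [stepInner]
  | cons a rest ih =>
    simp only [stepInner]
    by_cases hgt : a > bunch.getD i 0
    · rw [if_pos hgt, List.takeWhile_cons_of_neg (by simpa using hgt)]
      simp
    · rw [if_neg hgt, List.takeWhile_cons_of_pos (by simpa using not_lt.mp hgt), ih]
      by_cases hx : PySem.List.sorted (if a = bunch.getD i 0 then bunch.eraseIdx i
          else bunch.set i (bunch.getD i 0 - a)) (fun x => x) ∈ arr
      · rw [if_pos hx]
        constructor
        · rintro (h | ⟨b, hb, rfl⟩)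
          · exact Or.inl h
          · exact Or.inr ⟨b, List.mem_cons_of_mem _ hb, rfl⟩
        · rintro (h | ⟨b, hb, rfl⟩)
          · exact Or.inl h
          · rcases List.mem_cons.mp hb with rfl | hb
            · exact Or.inl hx
            · exact Or.inr ⟨b, hb, rfl⟩
      · rw [if_neg hx]
        constructor
        · rintro (h | ⟨b, hb, rfl⟩)
          · rcases List.mem_append.mp h with h | h
            · exact Or.inl h
            · exact Or.inr ⟨a, List.mem_cons_self, (List.mem_singleton.mp h)⟩
          · exact Or.inr ⟨b, List.mem_cons_of_mem _ hb, rfl⟩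
        · rintro (h | ⟨b, hb, rfl⟩)
          · exact Or.inl (List.mem_append_left _ h)
          · rcases List.mem_cons.mp hb with rfl | hb
            · exact Or.inl (List.mem_append_right _ (List.mem_singleton.mpr rfl))
            · exact Or.inr ⟨b, hb, rfl⟩

theorem mem_takeWhile123 (v a : Int) :
    (a ∈ ([1, 2, 3] : List Int).takeWhile (fun a => decide (a ≤ v))) ↔
      (1 ≤ a ∧ a ≤ 3 ∧ a ≤ v) := by
  simp only [List.takeWhile_cons, List.takeWhile_nil, decide_eq_true_eq]
  split_ifs <;> simp_all <;> omega

theorem mem_stepInner (bunch : List Int) (i : Nat) (arr : List (List Int)) (x : List Int)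
    (hi : i < bunch.length) :
    x ∈ stepInner bunch i [1, 2, 3] arr ↔
      x ∈ arr ∨ ∃ a : Int, 1 ≤ a ∧ a ≤ 3 ∧ a ≤ bunch.getD i 0 ∧ x = canon bunch (bunch.getD i 0) a := by
  rw [mem_stepInner_gen]
  constructor
  · rintro (h | ⟨a, ha, rfl⟩)
    · exact Or.inl h
    · obtain ⟨h1, h2, h3⟩ := (mem_takeWhile123 _ a).mp ha
      exact Or.inr ⟨a, h1, h2, h3, bval_eq_canon bunch i a hi⟩
  · rintro (h | ⟨a, h1, h2, h3, rfl⟩)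
    · exact Or.inl h
    · refine Or.inr ⟨a, (mem_takeWhile123 _ a).mpr ⟨h1, h2, h3⟩, ?_⟩
      exact (bval_eq_canon bunch i a hi).symm

theorem nodup_outerA (bunch : List Int) (idxs : List Nat) (arr : List (List Int)) (h : arr.Nodup) :
    (idxs.foldl (fun arr i => stepInner bunch i [1, 2, 3] arr) arr).Nodup := by
  induction idxs generalizing arr with
  | nil => exact h
  | cons i rest ih => exact ih _ (nodup_stepInner bunch i _ arr h)

theorem mem_outerA (bunch : List Int) (idxs : List Nat) (arr : List (List Int)) (x : List Int)
    (hidx : ∀ i ∈ idxs, i < bunch.length) :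
    x ∈ idxs.foldl (fun arr i => stepInner bunch i [1, 2, 3] arr) arr ↔
      x ∈ arr ∨ ∃ i ∈ idxs, ∃ a : Int,
        1 ≤ a ∧ a ≤ 3 ∧ a ≤ bunch.getD i 0 ∧ x = canon bunch (bunch.getD i 0) a := by
  induction idxs generalizing arr with
  | nil => simp
  | cons i rest ih =>
    rw [List.foldl_cons, ih _ (fun j hj => hidx j (List.mem_cons_of_mem _ hj)),
      mem_stepInner bunch i arr x (hidx i List.mem_cons_self)]
    constructor
    · rintro ((h | ⟨a, ha⟩) | ⟨j, hj, ha⟩)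
      · exact Or.inl h
      · exact Or.inr ⟨i, List.mem_cons_self, a, ha⟩
      · exact Or.inr ⟨j, List.mem_cons_of_mem _ hj, ha⟩
    · rintro (h | ⟨j, hj, ha⟩)
      · exact Or.inl (Or.inl h)
      · rcases List.mem_cons.mp hj with rfl | hj
        · exact Or.inl (Or.inr ha)
        · exact Or.inr ⟨j, hj, ha⟩

theorem memA (bunch : List Int) (x : List Int) :
    x ∈ (List.range bunch.length).foldl (fun arr i => stepInner bunch i [1, 2, 3] arr) [] ↔
      SuccMem bunch x := by
  rw [mem_outerA bunch _ _ x (fun i hi => List.mem_range.mp hi)]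
  unfold SuccMem
  constructor
  · rintro (h | ⟨i, hi, a, h1, h2, h3, rfl⟩)
    · simp at h
    · have hlt := List.mem_range.mp hi
      rw [List.getD_eq_getElem bunch 0 hlt] at *
      exact ⟨bunch[i], List.getElem_mem hlt, a, h1, h2, h3, rfl⟩
  · rintro ⟨v, hv, a, h1, h2, h3, rfl⟩
    obtain ⟨i, hlt, rfl⟩ := List.mem_iff_getElem.mp hv
    refine Or.inr ⟨i, List.mem_range.mpr hlt, a, ?_⟩
    rw [List.getD_eq_getElem bunch 0 hlt]
    exact ⟨h1, h2, h3, rfl⟩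

-- ---------- B-side lemmas ----------

-- insort recurrence (the while-loop/slice definition unfolded one element at a time)
theorem insort_nil (x : Int) : insort [] x = [x] := rfl

theorem insort_cons (y : Int) (ys : List Int) (x : Int) :
    insort (y :: ys) x = if y < x then y :: insort ys x else x :: y :: ys := by
  unfold insort
  by_cases h : y < x
  · simp [List.takeWhile_cons, h]
  · simp [List.takeWhile_cons, h]

theorem insort_perm (xs : List Int) (x : Int) : (insort xs x).Perm (x :: xs) := by
  induction xs with
  | nil => simp [insort_nil]
  | cons y ys ih =>
    rw [insort_cons]
    split
    · exact (ih.cons y).trans (List.Perm.swap x y ys)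
    · exact List.Perm.refl _

theorem insort_pairwise (xs : List Int) (x : Int) (h : xs.Pairwise (· ≤ ·)) :
    (insort xs x).Pairwise (· ≤ ·) := by
  induction xs with
  | nil => simp [insort_nil]
  | cons y ys ih =>
    rw [insort_cons]
    rcases List.pairwise_cons.mp h with ⟨hy, hys⟩
    split
    · rename_i hlt
      refine List.pairwise_cons.mpr ⟨?_, ih hys⟩
      intro b hb
      rcases List.mem_cons.mp ((insort_perm ys x).mem_iff.mp hb) with rfl | hbys
      · exact le_of_lt hlt
      · exact hy b hbys
    · rename_i hnlt
      refine List.pairwise_cons.mpr ⟨?_, h⟩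
      intro b hb
      rcases List.mem_cons.mp hb with rfl | hbys
      · exact not_lt.mp hnlt
      · exact le_trans (not_lt.mp hnlt) (hy b hbys)

theorem pairwise_erase_sorted (bunch : List Int) (v : Int) :
    ((PySem.List.sorted bunch (fun x => x)).erase v).Pairwise (· ≤ ·) :=
  (PySem.List.sorted_pairwise bunch (fun x => x)).sublist List.erase_sublist

theorem perm_erase_sorted (bunch : List Int) (v : Int) :
    ((PySem.List.sorted bunch (fun x => x)).erase v).Perm (bunch.erase v) :=
  (PySem.List.sorted_perm bunch (fun x => x) false).erase v

-- B's full-removal successor equals the canonical one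
theorem rest_eq_canon_full (bunch : List Int) (v : Int) :
    (PySem.List.sorted bunch (fun x => x)).erase v = canon bunch v v := by
  unfold canon
  rw [if_pos rfl]
  exact (PySem.List.sorted_id_eq_of_perm_of_pairwise _ _
    (perm_erase_sorted bunch v) (pairwise_erase_sorted bunch v)).symm

-- B's partial-removal successor equals the canonical one
theorem insort_eq_canon_partial (bunch : List Int) (v a : Int) (hne : a ≠ v) :
    insort ((PySem.List.sorted bunch (fun x => x)).erase v) (v - a) = canon bunch v a := by
  unfold canon
  rw [if_neg hne]
  refine (PySem.List.sorted_id_eq_of_perm_of_pairwise _ _ ?_ ?_).symm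
  · exact ((insort_perm _ (v - a)).trans
      (((perm_erase_sorted bunch v).cons (v - a)).trans
        (List.perm_append_singleton (v - a) (bunch.erase v)).symm))
  · exact insort_pairwise _ _ (pairwise_erase_sorted bunch v)

-- the fold with singleton appends is a map appended to the accumulator
theorem foldl_append_singleton {α β : Type} (l : List α) (f : α → β) (acc : List β) :
    l.foldl (fun out a => out ++ [f a]) acc = acc ++ l.map f := by
  induction l generalizing acc with
  | nil => simp
  | cons a t ih => simp [ih]

-- one outer-loop block of B
def blk (bunch : List Int) (v : Int) : List (List Int) :=
  if v ≤ 0 then []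
  else (PySem.List.pyRange 1 (min 3 v + 1)).map
    (fun a => if a = v then (PySem.List.remove? (PySem.List.sorted bunch (fun x => x)) v).getD []
      else insort ((PySem.List.remove? (PySem.List.sorted bunch (fun x => x)) v).getD []) (v - a))

theorem outerB_eq_flatMap (bunch : List Int) (vs : List Int) (acc : List (List Int)) :
    vs.foldl (fun out v =>
      if v ≤ 0 then out
      else
        (PySem.List.pyRange 1 (min 3 v + 1)).foldl (fun out amount =>
          out ++ [if amount = v then (PySem.List.remove? (PySem.List.sorted bunch (fun x => x)) v).getD []
            else insort ((PySem.List.remove? (PySem.List.sorted bunch (fun x => x)) v).getD []) (v - amount)]) out) acc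
    = acc ++ vs.flatMap (blk bunch) := by
  induction vs generalizing acc with
  | nil => simp
  | cons v t ih =>
    rw [List.foldl_cons, ih]
    by_cases hv : v ≤ 0
    · simp [blk, hv]
    · simp only [if_neg hv]
      rw [foldl_append_singleton]
      simp [blk, hv, List.append_assoc]

-- membership in a block
theorem mem_blk (bunch : List Int) (v : Int) (hv : v ∈ bunch) (x : List Int) :
    x ∈ blk bunch v ↔ ∃ a : Int, 1 ≤ a ∧ a ≤ 3 ∧ a ≤ v ∧ x = canon bunch v a := by
  have hrest : (PySem.List.remove? (PySem.List.sorted bunch (fun x => x)) v).getD []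
      = (PySem.List.sorted bunch (fun x => x)).erase v := by
    rw [PySem.List.remove?_eq_some_erase _ v
      ((PySem.List.mem_sorted bunch (fun x => x) false v).mpr hv)]
    rfl
  unfold blk
  by_cases hv0 : v ≤ 0
  · rw [if_pos hv0]
    simp only [List.not_mem_nil, false_iff]
    rintro ⟨a, h1, _, h3, _⟩; omega
  · rw [if_neg hv0, List.mem_map]
    constructor
    · rintro ⟨a, ha, rfl⟩
      obtain ⟨h1, h2⟩ := PySem.List.mem_pyRange_one.mp ha
      refine ⟨a, h1, by omega, by omega, ?_⟩
      rw [hrest]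
      by_cases hav : a = v
      · rw [if_pos hav, hav]; exact rest_eq_canon_full bunch v
      · rw [if_neg hav]; exact insort_eq_canon_partial bunch v a hav
    · rintro ⟨a, h1, h2, h3, rfl⟩
      refine ⟨a, PySem.List.mem_pyRange_one.mpr ⟨h1, by omega⟩, ?_⟩
      rw [hrest]
      by_cases hav : a = v
      · rw [if_pos hav, hav]; exact rest_eq_canon_full bunch v
      · rw [if_neg hav]; exact insort_eq_canon_partial bunch v a hav

-- THE KEY THEOREM: distinct (v, amount) pairs give distinct canonical successors
theorem canon_inj (bunch : List Int) (v w a b : Int)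
    (hv : v ∈ bunch) (hw : w ∈ bunch)
    (ha1 : 1 ≤ a) (hav : a ≤ v) (hb1 : 1 ≤ b) (hbw : b ≤ w)
    (heq : canon bunch v a = canon bunch w b) : v = w ∧ a = b := by
  unfold canon at heq
  have hperm := (PySem.List.sorted_id_eq_sorted_id_iff_perm _ _).mp heq
  have hcv : 1 ≤ bunch.count v := List.count_pos_iff.mpr hv
  have hcw : 1 ≤ bunch.count w := List.count_pos_iff.mpr hw
  by_cases hva : a = v <;> by_cases hwb : b = w
  · -- both full removals
    rw [if_pos hva, if_pos hwb] at hperm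
    by_cases hvw : v = w
    · exact ⟨hvw, by omega⟩
    · exfalso
      have := hperm.count_eq v
      rw [List.count_erase_self, List.count_erase_of_ne hvw] at this
      omega
  · -- full vs partial: lengths differ
    exfalso
    rw [if_pos hva, if_neg hwb] at hperm
    have := hperm.length_eq
    rw [List.length_erase_of_mem hv, List.length_append, List.length_erase_of_mem hw] at this
    have h1 : 1 ≤ bunch.length := List.length_pos_of_mem hv
    simp only [List.length_singleton] at this
    omega
  · exfalso
    rw [if_neg hva, if_pos hwb] at hperm
    have := hperm.length_eq
    rw [List.length_erase_of_mem hw, List.length_append, List.length_erase_of_mem hv] at this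
    have h1 : 1 ≤ bunch.length := List.length_pos_of_mem hv
    simp only [List.length_singleton] at this
    omega
  · -- both partial removals
    rw [if_neg hva, if_neg hwb] at hperm
    by_cases hvw : v = w
    · subst hvw
      have := hperm.count_eq (v - a)
      rw [List.count_append, List.count_append] at this
      have h1 : List.count (v - a) [v - a] = 1 := by simp
      have h2 : List.count (v - a) [v - b] = if v - a = v - b then 1 else 0 := by
        by_cases h : v - a = v - b <;> simp [List.count_singleton, h]
        omega
      rw [h1, h2] at this
      split_ifs at this with h
      · exact ⟨rfl, by omega⟩
      · omega
    · exfalso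
      have := hperm.count_eq v
      rw [List.count_append, List.count_append, List.count_erase_self,
        List.count_erase_of_ne hvw] at this
      have h1 : List.count v [v - a] = 0 := by
        simp [List.count_singleton]; omega
      have h2 : List.count v [w - b] ≤ 1 := List.count_le_length
      have h3 : 0 ≤ List.count v [w - b] := Nat.zero_le _
      omega

theorem nodup_blk (bunch : List Int) (v : Int) (hv : v ∈ bunch) : (blk bunch v).Nodup := by
  unfold blk
  by_cases hv0 : v ≤ 0
  · simp [hv0]
  · rw [if_neg hv0]
    refine List.Nodup.map_on ?_ (PySem.List.nodup_pyRange_one 1 (min 3 v + 1))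
    intro a ha b hb hfeq
    obtain ⟨ha1, ha2⟩ := PySem.List.mem_pyRange_one.mp ha
    obtain ⟨hb1, hb2⟩ := PySem.List.mem_pyRange_one.mp hb
    have hrest : (PySem.List.remove? (PySem.List.sorted bunch (fun x => x)) v).getD []
        = (PySem.List.sorted bunch (fun x => x)).erase v := by
      rw [PySem.List.remove?_eq_some_erase _ v
        ((PySem.List.mem_sorted bunch (fun x => x) false v).mpr hv)]
      rfl
    have hca : (if a = v then (PySem.List.remove? (PySem.List.sorted bunch (fun x => x)) v).getD []
        else insort ((PySem.List.remove? (PySem.List.sorted bunch (fun x => x)) v).getD []) (v - a))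
        = canon bunch v a := by
      rw [hrest]
      by_cases hav : a = v
      · rw [if_pos hav, hav]; exact rest_eq_canon_full bunch v
      · rw [if_neg hav]; exact insort_eq_canon_partial bunch v a hav
    have hcb : (if b = v then (PySem.List.remove? (PySem.List.sorted bunch (fun x => x)) v).getD []
        else insort ((PySem.List.remove? (PySem.List.sorted bunch (fun x => x)) v).getD []) (v - b))
        = canon bunch v b := by
      rw [hrest]
      by_cases hbv : b = v
      · rw [if_pos hbv, hbv]; exact rest_eq_canon_full bunch v
      · rw [if_neg hbv]; exact insort_eq_canon_partial bunch v b hbv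
    rw [hca, hcb] at hfeq
    exact (canon_inj bunch v v a b hv hv ha1 (by omega) hb1 (by omega) hfeq).2

theorem nodupB (bunch : List Int) (vs : List Int)
    (hvs : ∀ v ∈ vs, v ∈ bunch) (hnd : vs.Nodup) :
    (vs.flatMap (blk bunch)).Nodup := by
  induction vs with
  | nil => simp
  | cons v t ih =>
    rw [List.flatMap_cons, List.nodup_append]
    rcases List.nodup_cons.mp hnd with ⟨hvt, hndt⟩
    refine ⟨nodup_blk bunch v (hvs v List.mem_cons_self),
      ih (fun w hw => hvs w (List.mem_cons_of_mem _ hw)) hndt, ?_⟩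
    intro x hx y hy
    obtain ⟨a, ha1, _, hav, rfl⟩ := (mem_blk bunch v (hvs v List.mem_cons_self) x).mp hx
    obtain ⟨w, hw, hyw⟩ := List.mem_flatMap.mp hy
    obtain ⟨b, hb1, _, hbw, rfl⟩ :=
      (mem_blk bunch w (hvs w (List.mem_cons_of_mem _ hw)) y).mp hyw
    intro heq
    have := canon_inj bunch v w a b (hvs v List.mem_cons_self)
      (hvs w (List.mem_cons_of_mem _ hw)) ha1 hav hb1 hbw heq
    exact hvt (this.1 ▸ hw)

theorem memB (bunch : List Int) (vs : List Int)
    (hvs : ∀ v, v ∈ vs ↔ v ∈ bunch) (x : List Int) :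
    x ∈ vs.flatMap (blk bunch) ↔ SuccMem bunch x := by
  rw [List.mem_flatMap]
  unfold SuccMem
  constructor
  · rintro ⟨v, hv, hx⟩
    obtain ⟨a, ha⟩ := (mem_blk bunch v ((hvs v).mp hv) x).mp hx
    exact ⟨v, (hvs v).mp hv, a, ha⟩
  · rintro ⟨v, hv, a, ha⟩
    exact ⟨v, (hvs v).mpr hv, (mem_blk bunch v hv x).mpr ⟨a, ha⟩⟩

-- the two LT instances Lean elaborates for sorting lists of lists agree (core lex vs Mathlib Lex)
theorem decideLL : (fun (a b : List Int) => @decide (@LT.lt _ List.instLT a b) (a.decidableLT b))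
      = (fun a b => @decide (@LT.lt _ List.instLinearOrder.toLT a b) (@LinearOrder.toDecidableLT _ List.instLinearOrder a b)) := by
  funext a b
  apply Bool.eq_iff_iff.mpr
  simp only [decide_eq_true_eq]

theorem sortedLL_eq (xs : List (List Int)) :
    @PySem.List.sorted (List Int) (List Int) List.instLT (fun a b => a.decidableLT b) xs (fun x => x) false
  = @PySem.List.sorted (List Int) (List Int) List.instLinearOrder.toLT (@LinearOrder.toDecidableLT _ List.instLinearOrder) xs (fun x => x) false := by
  change xs.foldl (fun acc x => PySem.List.insertBy (fun (a b : List Int) => @decide (@LT.lt _ List.instLT a b) (a.decidableLT b)) x acc) []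
    = xs.foldl (fun acc x => PySem.List.insertBy (fun (a b : List Int) => @decide (@LT.lt _ List.instLinearOrder.toLT a b) (@LinearOrder.toDecidableLT _ List.instLinearOrder a b)) x acc) []
  rw [decideLL]

-- ===== VERDICT (by name: the statement is the Claim_ definition above) =====
theorem step_spec : Claim_equal_step := by
  intro bunch _
  unfold Spec_step
  simp only [step, step_alt]
  rw [outerB_eq_flatMap]
  rw [sortedLL_eq, sortedLL_eq]
  apply PySem.List.sorted_eq_sorted_of_perm _ _ _ (fun _ _ h => h)
  have hvs : ∀ v, v ∈ PySem.List.sorted (PySem.Set.ofList bunch) (fun x => x) ↔ v ∈ bunch := by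
    intro v
    rw [PySem.List.mem_sorted]
    exact PySem.Set.mem_ofList bunch v
  have hnd : (PySem.List.sorted (PySem.Set.ofList bunch) (fun x => x)).Nodup :=
    (PySem.List.sorted_ofList_pairwise_lt bunch).imp ne_of_lt
  rw [List.perm_ext_iff_of_nodup (nodup_outerA bunch _ _ List.nodup_nil)
    (by simpa using nodupB bunch _ (fun v hv => (hvs v).mp hv) hnd)]
  intro a
  rw [memA]
  simpa using (memB bunch _ hvs a).symm
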